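-- pv_equiv track=rewrite | github.com/mathagora-solve-math-ai/MathAgora | backend-solve/poc/feedback_poc.py | _fix_json_escapes
-- ===== SOURCE A (Python) =====
-- def _fix_json_escapes(text: str) -> str:
--     """Fix bare LaTeX backslash escapes (e.g. \\( \\) \\frac) that are invalid JSON.
--
--     Uses a character-by-character walk so that already-valid JSON escape
--     sequences (\\\\, \\n, \\t, \\uXXXX, etc.) are left untouched.
--     """
--     VALID_ESCAPES = set('"\\\/bfnrtu')
--     result: list[str] = []
--     i = 0
--     while i < len(text):
--         c = text[i]
--         if c == '\\' and i + 1 < len(text):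
--             nxt = text[i + 1]
--             if nxt in VALID_ESCAPES:
--                 # Already a valid JSON escape – consume both chars unchanged
--                 result.append(c)
--                 result.append(nxt)
--                 i += 2
--             else:
--                 # Bare backslash before an invalid escape char → double it
--                 result.append('\\')
--                 result.append('\\')
--                 i += 1  # leave nxt to be processed on the next iteration
--         else:
--             result.append(c)
--             i += 1
--     return ''.join(result)
-- ===== SOURCE B (Python) =====
-- import re
--
-- def _fix_json_escapes(text: str) -> str:
--     def repl(m):
--         nxt = m.group(1)
--         if nxt in '"\\/bfnrtu':
--             return m.group(0)
--         return '\\\\' + nxt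
--     return re.sub(r'\\(.)', repl, text, flags=re.DOTALL)
-- ===== Notes on version B (the rewrite author's own statement) =====
-- stated objective: idiomatic
-- what changed: Replaced the explicit index walk with accumulator list and variable-step advance by a single re.sub over the pattern \\(.) with a replacement callback that keeps valid escapes and doubles bare backslashes.
import Mathlib
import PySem

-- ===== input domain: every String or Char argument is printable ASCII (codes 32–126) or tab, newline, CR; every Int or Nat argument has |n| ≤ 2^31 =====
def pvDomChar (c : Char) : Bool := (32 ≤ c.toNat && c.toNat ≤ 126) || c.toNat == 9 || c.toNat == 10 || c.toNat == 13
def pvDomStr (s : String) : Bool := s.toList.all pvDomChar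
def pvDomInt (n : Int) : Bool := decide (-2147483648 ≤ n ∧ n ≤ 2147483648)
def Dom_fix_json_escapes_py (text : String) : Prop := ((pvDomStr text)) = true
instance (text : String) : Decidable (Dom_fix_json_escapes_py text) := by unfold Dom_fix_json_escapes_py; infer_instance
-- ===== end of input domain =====

-- B replaces A's explicit index walk (variable-step advance, accumulator list) with one
-- regex substitution over '\\(.)' via a callback; objective: idiomatic (same cost).

-- ===== PORT A =====
-- A's VALID_ESCAPES set
def pvValidEscapes : List Char := ['"', '\\', '/', 'b', 'f', 'n', 'r', 't', 'u']

-- A's while-loop over index i (i += 2 after a valid escape, i += 1 otherwise)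
def pvALoop (cs : List Char) (i : Nat) : List Char :=
  if h : i < cs.length then
    let c := cs[i]
    if c = '\\' ∧ i + 1 < cs.length then
      let nxt := cs[i + 1]!
      if nxt ∈ pvValidEscapes then
        c :: nxt :: pvALoop cs (i + 2)
      else
        '\\' :: '\\' :: pvALoop cs (i + 1)
    else
      c :: pvALoop cs (i + 1)
  else []
termination_by cs.length - i
decreasing_by all_goals omega

def fix_json_escapes_py (text : String) : String :=
  String.mk (pvALoop text.toList 0)

-- ===== PORT B =====
-- the regex r'\\(.)' with DOTALL: scan for a backslash followed by any character;
-- the callback keeps a valid escape and doubles a bare backslash (exact: hand-ported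
-- non-overlapping left-to-right matching, since PySem has no regex primitive)
def pvBSub (cs : List Char) : List Char :=
  match cs with
  | [] => []
  | '\\' :: nxt :: rest =>
      if nxt ∈ pvValidEscapes then '\\' :: nxt :: pvBSub rest
      else '\\' :: '\\' :: nxt :: pvBSub rest
  | c :: rest => c :: pvBSub rest

def fix_json_escapes_py_alt (text : String) : String :=
  String.mk (pvBSub text.toList)

-- ===== PRECONDITION & SPEC =====
def Spec_fix_json_escapes_py (text : String) (out : String) : Prop := out = fix_json_escapes_py_alt text
instance (text : String) (out : String) : Decidable (Spec_fix_json_escapes_py text out) := by unfold Spec_fix_json_escapes_py; infer_instance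

-- ===== CLAIM (what is proved, stated in full; the proofs are below) =====
def Claim_equal_fix_json_escapes_py : Prop := ∀ (text : String), Dom_fix_json_escapes_py text → Spec_fix_json_escapes_py text (fix_json_escapes_py text)

-- ===== LEMMAS AND PROOFS =====
theorem pvBSub_cons_ne (c : Char) (l : List Char) (h : c ≠ '\\') :
    pvBSub (c :: l) = c :: pvBSub l := by
  rw [pvBSub.eq_def]
  split
  · simp_all
  · rename_i heq; injection heq with h1 _; exact absurd h1 h
  · rename_i heq; injection heq with h1 h2; rw [h1, h2]

theorem pvBSub_singleton (c : Char) : pvBSub [c] = [c] := by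
  rw [pvBSub.eq_def]
  split
  · simp_all
  · rename_i heq; injection heq with _ h2; simp at h2
  · rename_i heq; injection heq with h1 h2; rw [h1, ← h2]; rfl

theorem pvBSub_backslash_cons (nxt : Char) (l : List Char) :
    pvBSub ('\\' :: nxt :: l) =
      if nxt ∈ pvValidEscapes then '\\' :: nxt :: pvBSub l
      else '\\' :: '\\' :: nxt :: pvBSub l := rfl

theorem pvALoop_eq_pvBSub_drop (cs : List Char) (i : Nat) :
    pvALoop cs i = pvBSub (cs.drop i) := by
  induction i using pvALoop.induct cs with
  | case1 i h c hv nxt hmem ih =>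
      obtain ⟨hback, h1⟩ := hv
      have hb : cs[i] = '\\' := hback
      have hnxt : cs[i+1]! = cs[i+1] := getElem!_pos cs (i+1) h1
      have hm : cs[i+1] ∈ pvValidEscapes := by rw [← hnxt]; exact hmem
      have hd : cs.drop i = cs[i] :: cs[i+1] :: cs.drop (i+2) := by
        rw [List.drop_eq_getElem_cons (by omega), List.drop_eq_getElem_cons (by omega)]
      rw [pvALoop, dif_pos h, if_pos ⟨hb, h1⟩, if_pos hmem, ih, hnxt, hd, hb,
        pvBSub_backslash_cons, if_pos hm]
  | case2 i h c hv nxt hmem ih =>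
      obtain ⟨hback, h1⟩ := hv
      have hb : cs[i] = '\\' := hback
      have hnxt : cs[i+1]! = cs[i+1] := getElem!_pos cs (i+1) h1
      have hm : cs[i+1] ∉ pvValidEscapes := by rw [← hnxt]; exact hmem
      have hnb : cs[i+1] ≠ '\\' := by
        intro hc; apply hm; rw [hc]; simp [pvValidEscapes]
      have hd : cs.drop i = cs[i] :: cs[i+1] :: cs.drop (i+2) := by
        rw [List.drop_eq_getElem_cons (by omega), List.drop_eq_getElem_cons (by omega)]
      have hd1 : cs.drop (i+1) = cs[i+1] :: cs.drop (i+2) :=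
        List.drop_eq_getElem_cons (by omega)
      rw [pvALoop, dif_pos h, if_pos ⟨hb, h1⟩, if_neg hmem, ih, hd1,
        pvBSub_cons_ne _ _ hnb, hd, hb, pvBSub_backslash_cons, if_neg hm]
  | case3 i h c hv ih =>
      have hv' : ¬(cs[i] = '\\' ∧ i + 1 < cs.length) := hv
      have hd : cs.drop i = cs[i] :: cs.drop (i+1) := List.drop_eq_getElem_cons h
      rw [pvALoop, dif_pos h, if_neg hv', ih]
      by_cases hb : cs[i] = '\\'
      · have hlast : ¬ i + 1 < cs.length := fun hc => hv' ⟨hb, hc⟩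
        have hnil : cs.drop (i+1) = [] := List.drop_eq_nil_of_le (by omega)
        rw [hd, hnil, pvBSub_singleton]; rfl
      · rw [hd, pvBSub_cons_ne _ _ hb]
  | case4 i h =>
      rw [pvALoop, dif_neg h, List.drop_eq_nil_of_le (by omega), pvBSub]

-- ===== VERDICT (by name: the statement is the Claim_ definition above) =====
theorem fix_json_escapes_py_spec : Claim_equal_fix_json_escapes_py := by
  intro text _
  unfold Spec_fix_json_escapes_py fix_json_escapes_py fix_json_escapes_py_alt
  rw [pvALoop_eq_pvBSub_drop, List.drop_zero]
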